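-- pv_equiv track=rewrite | github.com/GoodAI/goodai-ltm | goodai/ltm/mem/chunk_queue.py | _from_last_match
-- ===== SOURCE A (Python) =====
-- from typing import List, Dict, Optional
--
-- def _from_last_match(token_ids: List[int], sub_seqs: List[List[int]]):
--     nt = len(token_ids)
--     match_indexes = []
--     for sub_seq in sub_seqs:
--         ls = len(sub_seq)
--         if ls > 0:
--             for i in range(nt - ls, -1, -1):
--                 if token_ids[i:i + ls] == sub_seq:
--                     match_indexes.append((i, ls,))
--                     break
--     if len(match_indexes) == 0:
--         return token_ids
--     max_idx, max_len = max(match_indexes, key=lambda _t: _t[0])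
--     return token_ids[max_idx + max_len:]
-- ===== SOURCE B (Python) =====
-- def _from_last_match(token_ids, sub_seqs):
--     # Position-major scan: walk positions left to right, at each position take the
--     # first matching sub_seq, and keep a single running best (index, length) pair.
--     best = None
--     for i in range(len(token_ids)):
--         for sub_seq in sub_seqs:
--             ls = len(sub_seq)
--             if ls > 0 and token_ids[i:i + ls] == sub_seq:
--                 if best is None or i > best[0]:
--                     best = (i, ls)
--                 break
--     if best is None:
--         return token_ids
--     return token_ids[best[0] + best[1]:]
-- ===== Notes on version B (the rewrite author's own statement) =====
-- stated objective: alternative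
-- what changed: Replaces A's per-subsequence backward slice scan with break, the collected (index,len) list and the final max-by-index pass by a single forward position-major scan that keeps one running best (index,len) accumulator, the inner loop picking the first matching sub_seq at each position; no intermediate list and no max call.
import Mathlib
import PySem

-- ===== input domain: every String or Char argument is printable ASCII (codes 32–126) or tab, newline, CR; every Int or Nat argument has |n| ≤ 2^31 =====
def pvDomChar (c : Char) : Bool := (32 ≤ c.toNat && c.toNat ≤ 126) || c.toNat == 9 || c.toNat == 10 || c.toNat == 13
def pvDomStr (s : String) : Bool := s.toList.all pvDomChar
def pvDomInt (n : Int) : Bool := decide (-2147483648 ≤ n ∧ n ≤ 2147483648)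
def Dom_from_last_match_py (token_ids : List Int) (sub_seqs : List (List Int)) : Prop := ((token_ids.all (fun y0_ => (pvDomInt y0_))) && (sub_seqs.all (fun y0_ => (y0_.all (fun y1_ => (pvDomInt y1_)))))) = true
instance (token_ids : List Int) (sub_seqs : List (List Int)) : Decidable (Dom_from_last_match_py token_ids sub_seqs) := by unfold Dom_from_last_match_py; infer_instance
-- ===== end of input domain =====

-- B replaces A's per-subsequence backward scan + collected list + max-by-index by a single
-- forward position-major scan with one running best accumulator (objective: alternative).

-- ===== PORT A =====
def from_last_match_py (token_ids : List Int) (sub_seqs : List (List Int)) : List Int :=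
  let nt : Int := token_ids.length
  let match_indexes : List (Int × Int) :=
    sub_seqs.foldl (fun acc sub_seq =>
      let ls : Int := sub_seq.length
      if ls > 0 then
        -- 'for i in range(nt-ls, -1, -1): … break' = first i in the countdown with a match
        match (PySem.List.pyRange (nt - ls) (-1) (-1)).find?
            (fun i => PySem.List.slice token_ids (some i) (some (i + ls)) == sub_seq) with
        | some i => acc ++ [(i, ls)]
        | none => acc
      else acc) []
  match match_indexes with
  | [] => token_ids
  | p :: rest =>
    -- max(match_indexes, key=fst): first element with maximal first component
    let m := rest.foldl (fun b q => if q.1 > b.1 then q else b) p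
    PySem.List.slice token_ids (some (m.1 + m.2)) none

-- ===== PORT B =====
def from_last_match_py_alt (token_ids : List Int) (sub_seqs : List (List Int)) : List Int :=
  let nt : Int := token_ids.length
  let best : Option (Int × Int) :=
    (PySem.List.pyRange 0 nt 1).foldl (fun best i =>
      -- inner 'for sub_seq in sub_seqs: … break' = first matching sub_seq at position i
      match sub_seqs.find? (fun s =>
          decide (0 < s.length) &&
            (PySem.List.slice token_ids (some i) (some (i + (s.length : Int))) == s)) with
      | some s =>
        match best with
        | none => some (i, (s.length : Int))
        | some b => if i > b.1 then some (i, (s.length : Int)) else some b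
      | none => best) none
  match best with
  | none => token_ids
  | some b => PySem.List.slice token_ids (some (b.1 + b.2)) none

-- ===== PRECONDITION & SPEC =====
def Spec_from_last_match_py (token_ids : List Int) (sub_seqs : List (List Int)) (out : List Int) : Prop := out = from_last_match_py_alt token_ids sub_seqs
instance (token_ids : List Int) (sub_seqs : List (List Int)) (out : List Int) : Decidable (Spec_from_last_match_py token_ids sub_seqs out) := by unfold Spec_from_last_match_py; infer_instance

-- ===== CLAIM (what is proved, stated in full; the proofs are below) =====
def Claim_equal_from_last_match_py : Prop := ∀ (token_ids : List Int) (sub_seqs : List (List Int)), Dom_from_last_match_py token_ids sub_seqs → Spec_from_last_match_py token_ids sub_seqs (from_last_match_py token_ids sub_seqs)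

-- ===== LEMMAS AND PROOFS =====
-- ---------- proof helpers ----------

-- Python-level match predicate: sub_seq s matches token list t at Int position i
def mB (t s : List Int) (i : Int) : Bool :=
  decide (0 < s.length) &&
    (PySem.List.slice t (some i) (some (i + (s.length : Int))) == s)

def Has (t : List Int) (ss : List (List Int)) (i : Int) : Prop :=
  0 ≤ i ∧ ∃ s ∈ ss, mB t s i = true

def GoodNone (t : List Int) (ss : List (List Int)) : Prop := ∀ i, ¬ Has t ss i

def GoodSome (t : List Int) (ss : List (List Int)) (p : Int × Int) : Prop :=
  Has t ss p.1 ∧ (∀ j, Has t ss j → j ≤ p.1) ∧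
  ∃ s, ss.find? (fun s => mB t s p.1) = some s ∧ (s.length : Int) = p.2

theorem good_uniq (t : List Int) (ss : List (List Int)) (p q : Int × Int)
    (hp : GoodSome t ss p) (hq : GoodSome t ss q) : p = q := by
  obtain ⟨hp1, hp2, s, hs, hsl⟩ := hp
  obtain ⟨hq1, hq2, s', hs', hsl'⟩ := hq
  have h1 : p.1 = q.1 := le_antisymm (hq2 _ hp1) (hp2 _ hq1)
  rw [h1] at hs
  rw [hs] at hs'
  obtain rfl : s = s' := by injection hs'
  have : p.2 = q.2 := by rw [← hsl, ← hsl']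
  exact Prod.ext h1 this

theorem slice_eq_drop_take (t s : List Int) (j : Int) (hj : 0 ≤ j) :
    PySem.List.slice t (some j) (some (j + (s.length : Int)))
      = (t.drop j.toNat).take s.length := by
  rw [PySem.List.slice_toNat t hj (by omega)]
  have h : (j + (s.length : Int)).toNat - j.toNat = s.length := by omega
  rw [h]

theorem mB_iff (t s : List Int) (j : Int) (hj : 0 ≤ j) :
    mB t s j = true ↔ 0 < s.length ∧ (t.drop j.toNat).take s.length = s := by
  unfold mB
  rw [Bool.and_eq_true, decide_eq_true_iff, slice_eq_drop_take t s j hj, beq_iff_eq]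

theorem mNat_bound (t s : List Int) (k : Nat)
    (h : (t.drop k).take s.length = s) (hlen : 0 < s.length) :
    k + s.length ≤ t.length := by
  have := congrArg List.length h
  simp [List.length_take, List.length_drop] at this
  omega

theorem mB_bound (t s : List Int) (j : Int) (hj : 0 ≤ j) (h : mB t s j = true) :
    0 < s.length ∧ j + (s.length : Int) ≤ (t.length : Int) := by
  obtain ⟨h1, h2⟩ := (mB_iff t s j hj).mp h
  have := mNat_bound t s j.toNat h2 h1
  exact ⟨h1, by omega⟩

theorem has_lt (t : List Int) (ss : List (List Int)) (j : Int) (h : Has t ss j) :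
    j < (t.length : Int) := by
  obtain ⟨hj, s, hsm, hm⟩ := h
  obtain ⟨h1, h2⟩ := mB_bound t s j hj hm
  omega

-- ---------- B side ----------

def innerB (t : List Int) (ss : List (List Int)) (i : Int) : Option (List Int) :=
  ss.find? (fun s => mB t s i)

def stepB (t : List Int) (ss : List (List Int))
    (best : Option (Int × Int)) (i : Int) : Option (Int × Int) :=
  match innerB t ss i with
  | some s =>
    match best with
    | none => some (i, (s.length : Int))
    | some b => if i > b.1 then some (i, (s.length : Int)) else some b
  | none => best

def bestB (t : List Int) (ss : List (List Int)) (m : Int) : Option (Int × Int) :=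
  (PySem.List.pyRange 0 m 1).foldl (stepB t ss) none

theorem alt_eq (t : List Int) (ss : List (List Int)) :
    from_last_match_py_alt t ss =
      match bestB t ss (t.length : Int) with
      | none => t
      | some b => PySem.List.slice t (some (b.1 + b.2)) none := rfl

theorem bestB_inv (t : List Int) (ss : List (List Int)) : ∀ (m : Nat),
    (bestB t ss m = none → ∀ j, 0 ≤ j → j < (m : Int) → ¬ Has t ss j) ∧
    (∀ p, bestB t ss m = some p → 0 ≤ p.1 ∧ p.1 < (m : Int) ∧ Has t ss p.1 ∧
      (∀ j, Has t ss j → j < (m : Int) → j ≤ p.1) ∧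
      (∃ s, innerB t ss p.1 = some s ∧ (s.length : Int) = p.2)) := by
  intro m
  induction m with
  | zero =>
    constructor
    · intro _ j hj hjm; omega
    · intro p hp
      rw [bestB, Nat.cast_zero, PySem.List.pyRange_one_eq_nil (le_refl (0:Int))] at hp
      simp at hp
  | succ m ih =>
    have hsplit : bestB t ss (m + 1 : Nat) = stepB t ss (bestB t ss m) (m : Int) := by
      rw [bestB, show ((m + 1 : Nat) : Int) = (m : Int) + 1 by push_cast; ring,
        PySem.List.pyRange_one_succ_right (show (0:Int) ≤ (m:Int) by positivity), List.foldl_append]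
      rfl
    obtain ⟨ihn, ihs⟩ := ih
    rcases hfind : innerB t ss (m : Int) with _ | s
    · -- no sub_seq matches at position m
      have hfind' : List.find? (fun s => mB t s (m : Int)) ss = none := hfind
      have hno : ¬ Has t ss (m : Int) := by
        rintro ⟨_, s, hsm, hm⟩
        rw [List.find?_eq_none] at hfind'
        exact absurd hm (by simpa using hfind' s hsm)
      rw [hsplit, stepB, hfind] at *
      constructor
      · intro hb j hj hjm
        rcases lt_or_eq_of_le (show j ≤ (m : Int) by omega) with h | h
        · exact ihn hb j hj h
        · rw [h]; exact hno
      · intro p hp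
        obtain ⟨h1, h2, h3, h4, h5⟩ := ihs p hp
        refine ⟨h1, by omega, h3, ?_, h5⟩
        intro j hj hjm
        rcases lt_or_eq_of_le (show j ≤ (m : Int) by omega) with h | h
        · exact h4 j hj h
        · exact absurd (h ▸ hj) hno
    · -- first matching sub_seq at position m is s
      have hfind' : List.find? (fun s => mB t s (m : Int)) ss = some s := hfind
      have hsm : s ∈ ss := List.mem_of_find?_eq_some hfind'
      have hm : mB t s (m : Int) = true := by simpa using List.find?_some hfind'
      have hhas : Has t ss (m : Int) := ⟨by positivity, s, hsm, hm⟩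
      have hres : bestB t ss (m + 1 : Nat) = some ((m : Int), (s.length : Int)) := by
        rw [hsplit, stepB, hfind]
        rcases hb : bestB t ss m with _ | b
        · rfl
        · obtain ⟨h1, h2, _⟩ := ihs b hb
          simp [show (m : Int) > b.1 from h2]
      constructor
      · intro h; rw [hres] at h; exact absurd h (by simp)
      · intro p hp
        rw [hres] at hp
        obtain rfl : ((m : Int), (s.length : Int)) = p := by injection hp
        refine ⟨by positivity, by omega, hhas, ?_, s, hfind, rfl⟩
        intro j hj hjm; omega

theorem bestB_none (t : List Int) (ss : List (List Int))
    (h : bestB t ss (t.length : Int) = none) : GoodNone t ss := by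
  intro j hj
  exact (bestB_inv t ss t.length).1 h j hj.1 (has_lt t ss j hj) hj

theorem bestB_some (t : List Int) (ss : List (List Int)) (p : Int × Int)
    (h : bestB t ss (t.length : Int) = some p) : GoodSome t ss p := by
  obtain ⟨h1, h2, h3, h4, h5⟩ := (bestB_inv t ss t.length).2 p h
  exact ⟨h3, fun j hj => h4 j hj (has_lt t ss j hj), h5⟩

-- ---------- A side ----------

-- first hit of a countdown search range(a, -1, -1)
theorem findDesc (p : Int → Bool) : ∀ (k : Nat) (a : Int), a < (k : Int) →
    ((PySem.List.pyRange a (-1) (-1)).find? p = none →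
      ∀ j, 0 ≤ j → j ≤ a → p j = false) ∧
    (∀ i, (PySem.List.pyRange a (-1) (-1)).find? p = some i →
      0 ≤ i ∧ i ≤ a ∧ p i = true ∧ ∀ j, i < j → j ≤ a → p j = false) := by
  intro k
  induction k with
  | zero =>
    intro a ha
    rw [PySem.List.pyRange_neg_one_eq_nil (by omega : a ≤ -1)]
    constructor
    · intro _ j hj hja; omega
    · intro i hi; simp at hi
  | succ k ih =>
    intro a ha
    by_cases hneg : a ≤ -1
    · rw [PySem.List.pyRange_neg_one_eq_nil hneg]
      constructor
      · intro _ j hj hja; omega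
      · intro i hi; simp at hi
    · have ha0 : 0 ≤ a := by omega
      rw [PySem.List.pyRange_neg_one_cons (by omega : (-1 : Int) < a), List.find?_cons]
      rcases hpa : p a with _ | _
      · obtain ⟨ihn, ihs⟩ := ih (a - 1) (by omega)
        constructor
        · intro hnone j hj hja
          rcases lt_or_eq_of_le hja with h | h
          · exact ihn hnone j hj (by omega)
          · rw [h]; exact hpa
        · intro i hi
          obtain ⟨h1, h2, h3, h4⟩ := ihs i hi
          refine ⟨h1, by omega, h3, ?_⟩
          intro j hij hja
          rcases lt_or_eq_of_le hja with h | h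
          · exact h4 j hij (by omega)
          · rw [h]; exact hpa
      · constructor
        · intro h; simp at h
        · intro i hi
          obtain rfl : a = i := by injection hi
          exact ⟨ha0, le_refl a, hpa, fun j h1 h2 => by omega⟩

theorem findDesc' (p : Int → Bool) (a : Int) :
    ((PySem.List.pyRange a (-1) (-1)).find? p = none →
      ∀ j, 0 ≤ j → j ≤ a → p j = false) ∧
    (∀ i, (PySem.List.pyRange a (-1) (-1)).find? p = some i →
      0 ≤ i ∧ i ≤ a ∧ p i = true ∧ ∀ j, i < j → j ≤ a → p j = false) :=
  findDesc p (a.toNat + 1) a (by omega)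

def fA (t s : List Int) : Option Int :=
  (PySem.List.pyRange ((t.length : Int) - (s.length : Int)) (-1) (-1)).find?
    (fun i => PySem.List.slice t (some i) (some (i + (s.length : Int))) == s)

def gA (t : List Int) (s : List Int) : Option (Int × Int) :=
  if (s.length : Int) > 0 then (fA t s).map (fun i => (i, (s.length : Int))) else none

theorem matchIndexes_eq (t : List Int) : ∀ (ss : List (List Int)) (acc : List (Int × Int)),
    ss.foldl (fun acc sub_seq =>
      let ls : Int := sub_seq.length
      if ls > 0 then
        match (PySem.List.pyRange ((t.length : Int) - ls) (-1) (-1)).find?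
            (fun i => PySem.List.slice t (some i) (some (i + ls)) == sub_seq) with
        | some i => acc ++ [(i, ls)]
        | none => acc
      else acc) acc = acc ++ ss.filterMap (gA t) := by
  intro ss
  induction ss with
  | nil => intro acc; simp
  | cons s ss ih =>
    intro acc
    rw [List.foldl_cons, List.filterMap_cons, ih]
    simp only [gA, fA]
    by_cases h : (s.length : Int) > 0
    · simp only [if_pos h]
      rcases hf : (PySem.List.pyRange ((t.length : Int) - (s.length : Int)) (-1) (-1)).find?
          (fun i => PySem.List.slice t (some i) (some (i + (s.length : Int))) == s) with _ | i
      · simp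
      · simp
    · have h' : ¬ 0 < s.length := fun hc => h (by exact_mod_cast hc)
      simp [h']

-- the slice predicate searched by A, for a fixed sub_seq s
theorem mB_of_fA (t s : List Int) (hl : 0 < s.length) (i : Int)
    (h : fA t s = some i) : mB t s i = true ∧ 0 ≤ i := by
  obtain ⟨h1, _, h3, _⟩ := (findDesc' _ _).2 i h
  exact ⟨by rw [mB, Bool.and_eq_true, decide_eq_true_iff]; exact ⟨hl, h3⟩, h1⟩

theorem fA_ge (t s : List Int) (i j : Int) (h : fA t s = some i)
    (hj : 0 ≤ j) (hm : mB t s j = true) : j ≤ i := by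
  obtain ⟨_, _, _, h4⟩ := (findDesc' _ _).2 i h
  by_contra hc
  obtain ⟨hl, hb⟩ := mB_bound t s j hj hm
  have := h4 j (by omega) (by omega)
  rw [mB, Bool.and_eq_true] at hm
  rw [this] at hm
  simp at hm

theorem fA_ne_none (t s : List Int) (j : Int) (hj : 0 ≤ j) (hm : mB t s j = true) :
    fA t s ≠ none := by
  intro h
  obtain ⟨hl, hb⟩ := mB_bound t s j hj hm
  have := (findDesc' _ _).1 h j hj (by omega)
  rw [mB, Bool.and_eq_true] at hm
  rw [this] at hm
  simp at hm

-- pointwise correspondence at the global maximum position i*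
theorem point_corr (t : List Int) (ss : List (List Int)) (i : Int) (hi0 : 0 ≤ i)
    (hmax : ∀ j, Has t ss j → j ≤ i) (s : List Int) (hs : s ∈ ss) :
    mB t s i = true ↔ gA t s = some (i, (s.length : Int)) := by
  constructor
  · intro hm
    have hl : 0 < s.length := by
      rw [mB, Bool.and_eq_true, decide_eq_true_iff] at hm; exact hm.1
    rcases hf : fA t s with _ | j
    · exact absurd hf (fA_ne_none t s i hi0 hm)
    · have hji : j ≤ i := hmax j ⟨(mB_of_fA t s hl j hf).2, s, hs, (mB_of_fA t s hl j hf).1⟩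
      have hij : i ≤ j := fA_ge t s j i hf hi0 hm
      obtain rfl : j = i := by omega
      rw [gA, if_pos (by exact_mod_cast hl), hf]; rfl
  · intro hg
    rw [gA] at hg
    by_cases h : (s.length : Int) > 0
    · rw [if_pos h] at hg
      rcases hf : fA t s with _ | j
      · rw [hf] at hg; simp at hg
      · rw [hf] at hg
        simp at hg
        exact hg ▸ (mB_of_fA t s (by exact_mod_cast h) j hf).1
    · rw [if_neg h] at hg; simp at hg

theorem find_corr (t : List Int) (i : Int) (hi0 : 0 ≤ i) :
    ∀ (ss : List (List Int)), (∀ j, Has t ss j → j ≤ i) →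
    (ss.filterMap (gA t)).find? (fun q => q.1 == i)
      = (ss.find? (fun s => mB t s i)).map (fun s => (i, (s.length : Int))) := by
  intro ss
  induction ss with
  | nil => intro _; simp
  | cons s ss ih =>
    intro hmax
    have hmax' : ∀ j, Has t ss j → j ≤ i := by
      rintro j ⟨hj, s', hs', hm⟩
      exact hmax j ⟨hj, s', List.mem_cons_of_mem s hs', hm⟩
    have hpoint := point_corr t (s :: ss) i hi0 hmax s (List.mem_cons_self)
    rw [List.filterMap_cons]
    rcases hg : gA t s with _ | q
    · -- s contributes nothing; mB t s i must be false
      have hmb : mB t s i = false := by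
        rcases hb : mB t s i with _ | _
        · rfl
        · rw [hpoint.mp hb] at hg; simp at hg
      rw [List.find?_cons, hmb]
      simpa using ih hmax'
    · rw [List.find?_cons]
      by_cases hqi : q.1 = i
      · -- q is the (i, |s|) pair and s is the first match at i
        have hq : q = (i, (s.length : Int)) := by
          rw [gA] at hg
          by_cases h : (s.length : Int) > 0
          · rw [if_pos h] at hg
            rcases hf : fA t s with _ | j
            · rw [hf] at hg; simp at hg
            · rw [hf] at hg; simp at hg
              obtain ⟨h1, h2⟩ := Prod.ext_iff.mp hg
              exact Prod.ext hqi h2.symm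
          · rw [if_neg h] at hg; simp at hg
        have hmb : mB t s i = true := hpoint.mpr (hq ▸ hg)
        rw [List.find?_cons, hmb]
        simp [hq]
      · have hmb : mB t s i = false := by
          rcases hb : mB t s i with _ | _
          · rfl
          · rw [hpoint.mp hb] at hg
            obtain rfl : (i, (s.length : Int)) = q := by injection hg
            simp at hqi
        rw [List.find?_cons, hmb, show (q.1 == i) = false by simpa using hqi]
        simpa using ih hmax'

-- ---------- A's final max-by-first-component fold ----------

def maxStep (b q : Int × Int) : Int × Int := if q.1 > b.1 then q else b

theorem foldmax_split : ∀ (rest : List (Int × Int)) (p : Int × Int),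
    ∃ L1 L2, p :: rest = L1 ++ (rest.foldl maxStep p) :: L2 ∧
      (∀ q ∈ L1, q.1 < (rest.foldl maxStep p).1) ∧
      (∀ q ∈ L2, q.1 ≤ (rest.foldl maxStep p).1) := by
  intro rest
  induction rest with
  | nil => intro p; exact ⟨[], [], by simp, by simp, by simp⟩
  | cons q rest ih =>
    intro p
    rw [List.foldl_cons]
    by_cases hq : q.1 > p.1
    · rw [show maxStep p q = q by rw [maxStep, if_pos hq]]
      obtain ⟨L1, L2, hsplit, hlt, hle⟩ := ih q
      set m := rest.foldl maxStep q with hm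
      have hqm : q.1 ≤ m.1 := by
        rcases L1 with _ | ⟨x, L1'⟩
        · simp at hsplit
          have : q.1 = m.1 := congrArg Prod.fst hsplit.1
          omega
        · have hqx : q.1 = x.1 :=
            congrArg Prod.fst (by simpa using congrArg (·.head?) hsplit)
          have := hlt x List.mem_cons_self
          omega
      refine ⟨p :: L1, L2, by rw [List.cons_append, ← hsplit], ?_, hle⟩
      intro r hr
      rcases List.mem_cons.mp hr with rfl | hr
      · omega
      · exact hlt r hr
    · rw [show maxStep p q = p by rw [maxStep, if_neg hq]]
      obtain ⟨L1, L2, hsplit, hlt, hle⟩ := ih p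
      set m := rest.foldl maxStep p with hm
      rcases L1 with _ | ⟨x, L1'⟩
      · simp at hsplit
        obtain ⟨hpm, hrest⟩ := hsplit
        refine ⟨[], q :: L2, ?_, by simp, ?_⟩
        · rw [← hpm, hrest]; simp
        · intro r hr
          rcases List.mem_cons.mp hr with rfl | hr
          · have : p.1 = m.1 := congrArg Prod.fst hpm
            omega
          · exact hle r hr
      · rw [List.cons_append] at hsplit
        obtain ⟨hpx, hrest⟩ := List.cons_eq_cons.mp hsplit
        have hpm : p.1 < m.1 := by
          have := hlt x List.mem_cons_self
          have h2 : p.1 = x.1 := congrArg Prod.fst hpx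
          omega
        refine ⟨p :: q :: L1', L2, ?_, ?_, hle⟩
        · rw [hrest]; simp
        · intro r hr
          rcases List.mem_cons.mp hr with rfl | hr
          · exact hpm
          · rcases List.mem_cons.mp hr with rfl | hr
            · omega
            · exact hlt r (hpx ▸ List.mem_cons_of_mem x hr)

theorem foldmax_mem (rest : List (Int × Int)) (p : Int × Int) :
    rest.foldl maxStep p ∈ p :: rest := by
  obtain ⟨L1, L2, hsplit, _, _⟩ := foldmax_split rest p
  rw [hsplit]; exact List.mem_append_right L1 List.mem_cons_self

theorem foldmax_max (rest : List (Int × Int)) (p : Int × Int) (q : Int × Int)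
    (hq : q ∈ p :: rest) : q.1 ≤ (rest.foldl maxStep p).1 := by
  obtain ⟨L1, L2, hsplit, hlt, hle⟩ := foldmax_split rest p
  rw [hsplit] at hq
  rcases List.mem_append.mp hq with h | h
  · exact le_of_lt (hlt q h)
  · rcases List.mem_cons.mp h with rfl | h
    · exact le_refl _
    · exact hle q h

theorem foldmax_find (rest : List (Int × Int)) (p : Int × Int) :
    (p :: rest).find? (fun q => q.1 == (rest.foldl maxStep p).1)
      = some (rest.foldl maxStep p) := by
  obtain ⟨L1, L2, hsplit, hlt, hle⟩ := foldmax_split rest p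
  rw [hsplit]
  have : L1.find? (fun q => q.1 == (rest.foldl maxStep p).1) = none := by
    rw [List.find?_eq_none]
    intro q hq
    simp only [beq_iff_eq]
    exact ne_of_lt (hlt q hq)
  rw [List.find?_append, this, Option.none_or]
  simp

-- ---------- A characterization ----------

theorem a_eq (t : List Int) (ss : List (List Int)) :
    from_last_match_py t ss =
      match ss.filterMap (gA t) with
      | [] => t
      | p :: rest => PySem.List.slice t
          (some ((rest.foldl maxStep p).1 + (rest.foldl maxStep p).2)) none := by
  simp only [from_last_match_py]
  rw [matchIndexes_eq t ss [], List.nil_append]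
  rfl

theorem gA_some_has (t : List Int) (ss : List (List Int)) (s : List Int) (hs : s ∈ ss)
    (q : Int × Int) (hg : gA t s = some q) :
    Has t ss q.1 ∧ (s.length : Int) = q.2 := by
  rw [gA] at hg
  by_cases h : (s.length : Int) > 0
  · rw [if_pos h] at hg
    rcases hf : fA t s with _ | j
    · rw [hf] at hg; simp at hg
    · rw [hf] at hg; simp at hg
      obtain ⟨hm, hi⟩ := mB_of_fA t s (by exact_mod_cast h) j hf
      rw [← hg]
      exact ⟨⟨hi, s, hs, hm⟩, rfl⟩
  · rw [if_neg h] at hg; simp at hg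

theorem a_none_good (t : List Int) (ss : List (List Int))
    (h : ss.filterMap (gA t) = []) : GoodNone t ss := by
  rintro i ⟨hi, s, hs, hm⟩
  have hg : gA t s = none := List.filterMap_eq_nil_iff.mp h s hs
  obtain ⟨hl, _⟩ := mB_bound t s i hi hm
  rw [gA, if_pos (by exact_mod_cast hl)] at hg
  rcases hf : fA t s with _ | j
  · exact fA_ne_none t s i hi hm hf
  · rw [hf] at hg; simp at hg

theorem a_some_good (t : List Int) (ss : List (List Int)) (p : Int × Int)
    (rest : List (Int × Int)) (h : ss.filterMap (gA t) = p :: rest) :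
    GoodSome t ss (rest.foldl maxStep p) := by
  set m := rest.foldl maxStep p with hm
  have hmem : m ∈ ss.filterMap (gA t) := h ▸ foldmax_mem rest p
  obtain ⟨s0, hs0, hg0⟩ := List.mem_filterMap.mp hmem
  obtain ⟨hhas, _⟩ := gA_some_has t ss s0 hs0 m hg0
  have hi0 : 0 ≤ m.1 := hhas.1
  have hmax : ∀ j, Has t ss j → j ≤ m.1 := by
    rintro j ⟨hj, s, hs, hmb⟩
    obtain ⟨hl, _⟩ := mB_bound t s j hj hmb
    rcases hf : fA t s with _ | i
    · exact absurd hf (fA_ne_none t s j hj hmb)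
    · have hji : j ≤ i := fA_ge t s i j hf hj hmb
      have hmemi : (i, (s.length : Int)) ∈ ss.filterMap (gA t) := by
        refine List.mem_filterMap.mpr ⟨s, hs, ?_⟩
        rw [gA, if_pos (by exact_mod_cast hl), hf]; rfl
      have hle := foldmax_max rest p _ (h ▸ hmemi)
      rw [← hm] at hle
      simp at hle
      omega
  refine ⟨hhas, hmax, ?_⟩
  have hfc := find_corr t m.1 hi0 ss hmax
  have hff := foldmax_find rest p
  rw [← hm, ← h] at hff
  rw [hff] at hfc
  rcases hfind : ss.find? (fun s => mB t s m.1) with _ | s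
  · rw [hfind] at hfc; simp at hfc
  · rw [hfind, Option.map_some] at hfc
    have h2 := Option.some.inj hfc
    exact ⟨s, rfl, (congrArg Prod.snd h2).symm⟩

theorem main_eq (t : List Int) (ss : List (List Int)) :
    from_last_match_py t ss = from_last_match_py_alt t ss := by
  rw [a_eq, alt_eq]
  rcases hL : ss.filterMap (gA t) with _ | ⟨p, rest⟩
  · rcases hb : bestB t ss (t.length : Int) with _ | b
    · rfl
    · exact absurd (bestB_some t ss b hb).1 (a_none_good t ss hL b.1)
  · rcases hb : bestB t ss (t.length : Int) with _ | b
    · exact absurd (a_some_good t ss p rest hL).1 (bestB_none t ss hb _)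
    · have he := good_uniq t ss _ _ (a_some_good t ss p rest hL) (bestB_some t ss b hb)
      show PySem.List.slice t (some ((rest.foldl maxStep p).1 + (rest.foldl maxStep p).2)) none
        = PySem.List.slice t (some (b.1 + b.2)) none
      rw [he]

-- ===== VERDICT (by name: the statement is the Claim_ definition above) =====
theorem from_last_match_py_spec : Claim_equal_from_last_match_py := by
  intro t ss _
  unfold Spec_from_last_match_py
  exact main_eq t ss
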